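-- pv_equiv track=rewrite | github.com/DL2021Spring/CourseProject | data_files/844 Backspace String Compare.py | make_stk
-- ===== SOURCE A (Python) =====
-- def make_stk(S):
--     stk = []
--     for s in S:
--         if s == "#":
--             if stk:
--                 stk.pop()
--         else:
--             stk.append(s)
--
--     return stk
-- ===== SOURCE B (Python) =====
-- def make_stk(S):
--     skip = 0
--     out = []
--     for c in reversed(S):
--         if c == "#":
--             skip += 1
--         elif skip > 0:
--             skip -= 1
--         else:
--             out.append(c)
--     out.reverse()
--     return out
-- ===== Notes on version B (the rewrite author's own statement) =====
-- stated objective: alternative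
-- what changed: Replaces the left-to-right stack with pop by a single backward pass keeping an integer skip counter and collecting survivors, reversed at the end.
import Mathlib
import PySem

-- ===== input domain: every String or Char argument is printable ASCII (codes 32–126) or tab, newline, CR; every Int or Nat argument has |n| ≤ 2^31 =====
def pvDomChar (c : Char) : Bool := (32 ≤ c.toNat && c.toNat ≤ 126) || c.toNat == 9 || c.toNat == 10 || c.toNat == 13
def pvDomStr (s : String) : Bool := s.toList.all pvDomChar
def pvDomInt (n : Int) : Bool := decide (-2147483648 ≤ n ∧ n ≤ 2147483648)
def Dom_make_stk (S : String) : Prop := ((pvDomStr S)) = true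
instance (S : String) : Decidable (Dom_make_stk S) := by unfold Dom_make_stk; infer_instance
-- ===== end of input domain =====

-- B replaces A's left-to-right stack-and-pop with a single backward pass over a skip counter; objective: alternative decomposition, same cost.

-- ===== PORT A =====
-- 'if stk: stk.pop()' = drop the last element when nonempty (dropLast is the identity on []), exact.
def make_stk (S : String) : List String :=
  S.toList.foldl
    (fun stk s =>
      if s = '#' then
        if stk ≠ [] then stk.dropLast else stk
      else stk ++ [s.toString])
    []

-- ===== PORT B =====
-- 'for c in reversed(S)' = foldl over the reversed char list; state is (skip, out); out reversed at the end.
def make_stk_alt (S : String) : List String :=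
  (S.toList.reverse.foldl
    (fun (st : Nat × List String) c =>
      if c = '#' then (st.1 + 1, st.2)
      else if st.1 > 0 then (st.1 - 1, st.2)
      else (st.1, st.2 ++ [c.toString]))
    (0, [])).2.reverse

-- ===== PRECONDITION & SPEC =====
def Spec_make_stk (S : String) (out : List String) : Prop := out = make_stk_alt S
instance (S : String) (out : List String) : Decidable (Spec_make_stk S out) := by unfold Spec_make_stk; infer_instance

-- ===== CLAIM (what is proved, stated in full; the proofs are below) =====
def Claim_equal_make_stk : Prop := ∀ (S : String), Dom_make_stk S → Spec_make_stk S (make_stk S)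

-- ===== LEMMAS AND PROOFS =====

def pvStepA (stk : List String) (s : Char) : List String :=
  if s = '#' then
    if stk ≠ [] then stk.dropLast else stk
  else stk ++ [s.toString]

def pvStepB (st : Nat × List String) (c : Char) : Nat × List String :=
  if c = '#' then (st.1 + 1, st.2)
  else if st.1 > 0 then (st.1 - 1, st.2)
  else (st.1, st.2 ++ [c.toString])

lemma pvStepA_hash (stk : List String) : pvStepA stk '#' = stk.dropLast := by
  unfold pvStepA
  by_cases h : stk = [] <;> simp [h]

lemma dropLast_iterate_nil (k : Nat) : (List.dropLast)^[k] ([] : List String) = [] := by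
  induction k with
  | zero => rfl
  | succ k ih => rw [Function.iterate_succ_apply, List.dropLast_nil, ih]

lemma pvInvariant (l : List Char) (stk : List String) :
    l.foldl pvStepA stk =
      (List.dropLast)^[(l.foldr (fun c st => pvStepB st c) (0, [])).1] stk
        ++ (l.foldr (fun c st => pvStepB st c) (0, [])).2.reverse := by
  induction l generalizing stk with
  | nil => simp
  | cons c l ih =>
    simp only [List.foldl_cons, List.foldr_cons]
    rw [ih]
    by_cases hc : c = '#'
    · subst hc
      rw [pvStepA_hash]
      simp [pvStepB, Function.iterate_succ_apply]
    · have hA : pvStepA stk c = stk ++ [c.toString] := by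
        unfold pvStepA; simp [hc]
      rw [hA]
      set st := l.foldr (fun c st => pvStepB st c) (0, []) with hst
      by_cases hk : st.1 > 0
      · obtain ⟨m, hm⟩ : ∃ m, st.1 = m + 1 := ⟨st.1 - 1, by omega⟩
        simp [pvStepB, hc, hm, Function.iterate_succ_apply]
      · have h0 : st.1 = 0 := by omega
        simp [pvStepB, hc, h0, List.reverse_append]

-- ===== VERDICT (by name: the statement is the Claim_ definition above) =====
theorem make_stk_spec : Claim_equal_make_stk := by
  intro S _
  unfold Spec_make_stk
  have hA : make_stk S = S.toList.foldl pvStepA [] := rfl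
  have hB : make_stk_alt S =
      (S.toList.foldr (fun c st => pvStepB st c) (0, [])).2.reverse := by
    unfold make_stk_alt
    rw [List.foldl_reverse]
    rfl
  rw [hA, hB, pvInvariant, dropLast_iterate_nil, List.nil_append]
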